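-- pv_equiv track=rewrite | github.com/RobinFiveWords/AdventOfCode | 2023/day18.py | get_horizontals
-- ===== SOURCE A (Python) =====
-- import collections
--
-- def get_horizontals(vs, hs):
--   # return [(start, end), (vert1, None), (vert2, None), (start, end)] etc.
--   horizontals = collections.defaultdict(list)
--   for col_start, col_end, row in hs:
--     horizontals[row].append((col_start, col_end))
--   for row in horizontals:
--     for row_start, row_end, column in vs:
--       if row_start < row < row_end:
--         horizontals[row].append((column, None))
--   return horizontals
-- ===== SOURCE B (Python) =====
-- def get_horizontals(vs, hs):
--     # Build the result directly as a dict comprehension: keys are the distinct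
--     # rows in first-occurrence order; each value is the row's horizontal spans
--     # (in hs order) followed by the verticals crossing it (in vs order).
--     rows = list(dict.fromkeys(row for _, _, row in hs))
--     return {r: [(cs, ce) for cs, ce, row in hs if row == r]
--                + [(c, None) for rs, re, c in vs if rs < r < re]
--             for r in rows}
-- ===== Notes on version B (the rewrite author's own statement) =====
-- stated objective: simpler
-- what changed: Instead of mutating a defaultdict in two staged loops, B computes the distinct rows once and builds the whole result as a single dict comprehension whose value for each row is a filter of hs plus a filter of vs.
import Mathlib
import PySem

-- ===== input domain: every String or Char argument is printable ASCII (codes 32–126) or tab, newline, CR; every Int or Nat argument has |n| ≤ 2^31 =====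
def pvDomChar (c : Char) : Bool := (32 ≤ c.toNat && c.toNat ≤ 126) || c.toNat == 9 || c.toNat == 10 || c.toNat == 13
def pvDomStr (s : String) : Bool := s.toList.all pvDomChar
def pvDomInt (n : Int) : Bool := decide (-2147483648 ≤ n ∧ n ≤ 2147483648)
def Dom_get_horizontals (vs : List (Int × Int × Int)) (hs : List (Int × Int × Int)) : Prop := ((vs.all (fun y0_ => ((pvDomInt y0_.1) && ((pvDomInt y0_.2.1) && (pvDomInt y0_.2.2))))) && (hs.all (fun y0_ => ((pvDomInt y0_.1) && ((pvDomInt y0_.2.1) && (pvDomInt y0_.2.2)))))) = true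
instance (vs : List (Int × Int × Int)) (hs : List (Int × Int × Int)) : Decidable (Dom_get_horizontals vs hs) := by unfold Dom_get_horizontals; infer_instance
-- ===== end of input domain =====

-- B replaces A's two staged mutation loops over a defaultdict by one direct dict
-- comprehension over the distinct rows (objective: simpler; same asymptotic class).

-- ===== PORT A =====
-- defaultdict(list): horizontals[row].append(x) = modify row [] (· ++ [x])
def get_horizontals (vs : List (Int × Int × Int)) (hs : List (Int × Int × Int)) : List (Int × List (Option Int × Option Int)) :=
  let horizontals : PySem.Dict Int (List (Option Int × Option Int)) :=
    hs.foldl (fun d h => d.modify h.2.2 [] (fun l => l ++ [(some h.1, some h.2.1)])) PySem.Dict.empty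
  let horizontals2 :=
    horizontals.keys.foldl (fun d row =>
      vs.foldl (fun d v =>
        if v.1 < row && row < v.2.1 then d.modify row [] (fun l => l ++ [(some v.2.2, none)]) else d) d)
      horizontals
  horizontals2.items

-- ===== PORT B =====
-- list(dict.fromkeys(…)) = PySem.List.dedup; the dict comprehension runs over the
-- DISTINCT rows in order, so the resulting dict's items are exactly this map (one
-- pair per row, in comprehension order); each comprehension inside is a filter+map.
def get_horizontals_alt (vs : List (Int × Int × Int)) (hs : List (Int × Int × Int)) : List (Int × List (Option Int × Option Int)) :=
  (PySem.List.dedup (hs.map (fun h => h.2.2))).map (fun r =>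
    (r, (hs.filter (fun h => h.2.2 == r)).map (fun h => ((some h.1 : Option Int), (some h.2.1 : Option Int)))
        ++ (vs.filter (fun v => v.1 < r && r < v.2.1)).map (fun v => ((some v.2.2 : Option Int), (none : Option Int)))))

-- ===== PRECONDITION & SPEC =====
def Spec_get_horizontals (vs : List (Int × Int × Int)) (hs : List (Int × Int × Int)) (out : List (Int × List (Option Int × Option Int))) : Prop := out = get_horizontals_alt vs hs
instance (vs : List (Int × Int × Int)) (hs : List (Int × Int × Int)) (out : List (Int × List (Option Int × Option Int))) : Decidable (Spec_get_horizontals vs hs out) := by unfold Spec_get_horizontals; infer_instance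

-- ===== CLAIM (what is proved, stated in full; the proofs are below) =====
def Claim_equal_get_horizontals : Prop := ∀ (vs : List (Int × Int × Int)) (hs : List (Int × Int × Int)), Dom_get_horizontals vs hs → Spec_get_horizontals vs hs (get_horizontals vs hs)

-- ===== LEMMAS AND PROOFS =====

def pvG (vs : List (Int × Int × Int)) (k : Int) : List (Option Int × Option Int) :=
  (vs.filter (fun v => v.1 < k && k < v.2.1)).map (fun v => ((some v.2.2 : Option Int), (none : Option Int)))

theorem pv_getD_innerA (vs : List (Int × Int × Int)) (row k : Int)
    (d : PySem.Dict Int (List (Option Int × Option Int))) :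
    (vs.foldl (fun d v =>
        if v.1 < row && row < v.2.1 then d.modify row [] (fun l => l ++ [(some v.2.2, none)]) else d) d).getD k []
      = if k = row then d.getD k [] ++ pvG vs row else d.getD k [] := by
  induction vs generalizing d with
  | nil => simp [pvG]
  | cons v rest ih =>
    simp only [List.foldl_cons]
    by_cases hc : (v.1 < row && row < v.2.1) = true
    · rw [if_pos hc, ih]
      by_cases hk : k = row
      · subst hk
        simp [PySem.Dict.getD_modify_self, pvG, hc]
      · simp [hk, PySem.Dict.getD_modify_of_ne d _ _ hk]
    · rw [if_neg hc, ih]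
      by_cases hk : k = row
      · subst hk; simp [pvG, hc]
      · simp [hk]

theorem pv_keys_modify_mem {ν : Type} (d : PySem.Dict Int ν) (row : Int) (d0 : ν) (f : ν → ν)
    (hrow : row ∈ d.keys) : (d.modify row d0 f).keys = d.keys := by
  rw [PySem.Dict.keys_modify, PySem.Dict.keys_insert_of_contains]
  exact (PySem.Dict.contains_iff_mem_keys d row).mpr hrow

theorem pv_keys_innerA (vs : List (Int × Int × Int)) (row : Int)
    (d : PySem.Dict Int (List (Option Int × Option Int))) (hrow : row ∈ d.keys) :
    (vs.foldl (fun d v =>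
        if v.1 < row && row < v.2.1 then d.modify row [] (fun l => l ++ [(some v.2.2, none)]) else d) d).keys
      = d.keys := by
  induction vs generalizing d with
  | nil => rfl
  | cons v rest ih =>
    simp only [List.foldl_cons]
    by_cases hc : (v.1 < row && row < v.2.1) = true
    · rw [if_pos hc, ih _ (by rw [pv_keys_modify_mem d row _ _ hrow]; exact hrow),
        pv_keys_modify_mem d row _ _ hrow]
    · rw [if_neg hc, ih _ hrow]

theorem pv_getD_outerA (ks : List Int) (vs : List (Int × Int × Int)) (k : Int)
    (d : PySem.Dict Int (List (Option Int × Option Int))) (hnd : ks.Nodup)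
    (hks : ∀ r ∈ ks, r ∈ d.keys) :
    (ks.foldl (fun d row =>
        vs.foldl (fun d v =>
          if v.1 < row && row < v.2.1 then d.modify row [] (fun l => l ++ [(some v.2.2, none)]) else d) d) d).getD k []
      = if k ∈ ks then d.getD k [] ++ pvG vs k else d.getD k [] := by
  induction ks generalizing d with
  | nil => simp
  | cons r rest ih =>
    simp only [List.foldl_cons]
    have hnd' := hnd
    rw [List.nodup_cons] at hnd'
    have hkeys : (vs.foldl (fun d v =>
        if v.1 < r && r < v.2.1 then d.modify r [] (fun l => l ++ [(some v.2.2, none)]) else d) d).keys = d.keys :=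
      pv_keys_innerA vs r d (hks r (by simp))
    rw [ih _ hnd'.2 (fun x hx => by rw [hkeys]; exact hks x (by simp [hx]))]
    by_cases hk : k ∈ rest
    · rw [if_pos hk, if_pos (by simp [hk]), pv_getD_innerA]
      have : ¬ k = r := fun h => hnd'.1 (h ▸ hk)
      rw [if_neg this]
    · rw [if_neg hk, pv_getD_innerA]
      by_cases hkr : k = r
      · subst hkr; rw [if_pos rfl, if_pos (by simp)]
      · rw [if_neg hkr, if_neg (by simp [hkr, hk])]

theorem pv_keys_outerA (ks : List Int) (vs : List (Int × Int × Int))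
    (d : PySem.Dict Int (List (Option Int × Option Int))) (hks : ∀ r ∈ ks, r ∈ d.keys) :
    (ks.foldl (fun d row =>
        vs.foldl (fun d v =>
          if v.1 < row && row < v.2.1 then d.modify row [] (fun l => l ++ [(some v.2.2, none)]) else d) d) d).keys
      = d.keys := by
  induction ks generalizing d with
  | nil => rfl
  | cons r rest ih =>
    simp only [List.foldl_cons]
    have hkeys := pv_keys_innerA vs r d (hks r (by simp))
    rw [ih _ (fun x hx => by rw [hkeys]; exact hks x (by simp [hx])), hkeys]

-- ===== VERDICT (by name: the statement is the Claim_ definition above) =====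
theorem get_horizontals_spec : Claim_equal_get_horizontals := by
  intro vs hs _
  show get_horizontals vs hs = get_horizontals_alt vs hs
  unfold get_horizontals get_horizontals_alt
  set d0 : PySem.Dict Int (List (Option Int × Option Int)) :=
    hs.foldl (fun d h => d.modify h.2.2 [] (fun l => l ++ [(some h.1, some h.2.1)])) PySem.Dict.empty with hd0
  have hkeys0 : d0.keys = PySem.List.dedup (hs.map (fun h => h.2.2)) := by
    rw [hd0, PySem.Dict.keys_foldl_modify_key hs (fun h => h.2.2) []
      (fun d h => fun l => l ++ [(some h.1, some h.2.1)]) PySem.Dict.empty,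
      PySem.Dict.keys_empty, PySem.Set.update_nil_left, PySem.List.dedup_eq_ofList]
  have hnd0 : d0.keys.Nodup := by
    rw [hkeys0]; exact PySem.List.nodup_dedup _
  have hgetD0 : ∀ k : Int, d0.getD k []
      = (hs.filter (fun h => h.2.2 == k)).map (fun h => ((some h.1 : Option Int), (some h.2.1 : Option Int))) := by
    intro k
    have := PySem.Dict.getD_foldl_modify_append
      (l := hs.map (fun h => ((h.2.2 : Int), ((some h.1 : Option Int), (some h.2.1 : Option Int)))))
      (d := (PySem.Dict.empty : PySem.Dict Int (List (Option Int × Option Int)))) (c := k)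
    rw [List.foldl_map] at this
    simp only [hd0, this, PySem.Dict.getD_empty, List.nil_append, List.filter_map, List.map_map]
    rfl
  have hkeysA := pv_keys_outerA d0.keys vs d0 (fun r hr => hr)
  rw [PySem.Dict.items_eq_map_keys _ (by rw [hkeysA]; exact hnd0) ([] : List (Option Int × Option Int)),
      hkeysA, hkeys0]
  apply List.map_congr_left
  intro k hk
  have hA := pv_getD_outerA d0.keys vs k d0 hnd0 (fun r hr => hr)
  rw [if_pos (by rw [hkeys0]; exact hk)] at hA
  rw [← hkeys0, hA, hgetD0 k]
  rfl
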